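-- pv_equiv track=rewrite | github.com/axel9410/VersionPlus | Fonction/basic_function.py | find_version_line_number
-- ===== SOURCE A (Python) =====
-- def find_version_line_number(all_lines):
--     number_line = 0
--     version_line_number = 0
--
--     for line in all_lines:
--
--         if "__version__ =" in line:
--             version_line_number = number_line
--
--         number_line = number_line + 1
--     return version_line_number
-- ===== SOURCE B (Python) =====
-- def find_version_line_number(all_lines):
--     for i in range(len(all_lines) - 1, -1, -1):
--         if "__version__ =" in all_lines[i]:
--             return i
--     return 0
-- ===== Notes on version B (the rewrite author's own statement) =====
-- stated objective: alternative
-- what changed: B scans from the last line backwards and returns at the first match (early exit), instead of A's forward full scan that keeps overwriting a tracked variable.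
import Mathlib
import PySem

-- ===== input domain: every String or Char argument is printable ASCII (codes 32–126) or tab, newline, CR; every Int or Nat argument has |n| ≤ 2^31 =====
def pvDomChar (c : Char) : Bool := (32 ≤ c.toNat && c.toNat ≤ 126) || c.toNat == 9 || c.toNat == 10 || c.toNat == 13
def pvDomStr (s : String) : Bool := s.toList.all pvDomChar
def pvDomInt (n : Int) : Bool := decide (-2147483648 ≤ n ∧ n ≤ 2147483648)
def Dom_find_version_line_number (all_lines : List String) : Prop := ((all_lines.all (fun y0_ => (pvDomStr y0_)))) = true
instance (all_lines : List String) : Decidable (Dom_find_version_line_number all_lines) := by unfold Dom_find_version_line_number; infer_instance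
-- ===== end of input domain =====

-- B scans backwards with an early exit instead of A's forward overwrite scan (alternative decomposition, same cost).
-- ===== PORT A =====
-- state = (number_line, version_line_number)
def find_version_line_number (all_lines : List String) : Int :=
  (all_lines.foldl
    (fun (s : Int × Int) line =>
      (s.1 + 1, if PySem.Str.isIn "__version__ =" line then s.1 else s.2))
    (0, 0)).2

-- ===== PORT B =====
-- reverse index loop: fvAltGo ls (i+1) inspects index i, then continues downwards; fvAltGo ls 0 = 0 (no match found)
def fvAltGo (ls : List String) : Nat → Int
  | 0 => 0
  | i + 1 => if PySem.Str.isIn "__version__ =" (ls.getD i "") then (i : Int) else fvAltGo ls i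

def find_version_line_number_alt (all_lines : List String) : Int :=
  fvAltGo all_lines all_lines.length

-- ===== PRECONDITION & SPEC =====
def Spec_find_version_line_number (all_lines : List String) (out : Int) : Prop := out = find_version_line_number_alt all_lines
instance (all_lines : List String) (out : Int) : Decidable (Spec_find_version_line_number all_lines out) := by unfold Spec_find_version_line_number; infer_instance

-- ===== CLAIM (what is proved, stated in full; the proofs are below) =====
def Claim_equal_find_version_line_number : Prop := ∀ (all_lines : List String), Dom_find_version_line_number all_lines → Spec_find_version_line_number all_lines (find_version_line_number all_lines)

-- ===== LEMMAS AND PROOFS =====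
theorem fvA_fst (ls : List String) : ∀ (k v : Int),
    (ls.foldl
      (fun (s : Int × Int) line =>
        (s.1 + 1, if PySem.Str.isIn "__version__ =" line then s.1 else s.2))
      (k, v)).1 = k + ls.length := by
  induction ls with
  | nil => intro k v; simp
  | cons x xs ih =>
    intro k v
    simp only [List.foldl_cons, List.length_cons]
    rw [ih]
    push_cast
    ring

theorem fvAltGo_append (ls : List String) (x : String) :
    ∀ i, i ≤ ls.length → fvAltGo (ls ++ [x]) i = fvAltGo ls i := by
  intro i
  induction i with
  | zero => intro _; rfl
  | succ j ih =>
    intro hj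
    have hjlt : j < ls.length := Nat.lt_of_succ_le hj
    simp only [fvAltGo]
    rw [List.getD_append _ _ _ _ hjlt, ih (Nat.le_of_lt hjlt)]

theorem fvMain (ls : List String) :
    find_version_line_number ls = find_version_line_number_alt ls := by
  induction ls using List.reverseRecOn with
  | nil => rfl
  | append_singleton xs x ih =>
    simp only [find_version_line_number, List.foldl_append, List.foldl_cons, List.foldl_nil]
    simp only [find_version_line_number_alt, List.length_append, List.length_cons,
      List.length_nil, Nat.zero_add, fvAltGo]
    rw [List.getD_append_right _ _ _ _ (Nat.le_refl xs.length)]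
    rw [fvAltGo_append xs x xs.length (Nat.le_refl _)]
    rw [fvA_fst]
    by_cases h : PySem.Str.isIn "__version__ =" x = true
    · simp at h ⊢
      simp [h]
    · simp only [Bool.not_eq_true] at h
      simp at h ⊢
      simp only [h, Bool.false_eq_true, if_false]
      have h2 := ih
      simp [find_version_line_number, find_version_line_number_alt] at h2
      exact h2

-- ===== VERDICT (by name: the statement is the Claim_ definition above) =====
theorem find_version_line_number_spec : Claim_equal_find_version_line_number := by
  intro ls _
  exact fvMain ls
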